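-- pv_equiv track=rewrite | github.com/EronDS/Bioinformatics | BioinformaticsAlgorithms/BioinformaticsI/Week2/Week2.py | FindMostFrequentKmerAndKmerR
-- ===== SOURCE A (Python) =====
-- import itertools
--
-- def HammingDistance(p,q):
--     """
--     The amount of mismatches (deletions,
--     insertions,or changes in nucleotides)
--     between a sequence and a querry
--     """
--     count = 0
--     for i in range(len(p)):
--         if p[i] != q[i]:
--             count += 1
--     return count
--
-- def ReverseComplement(seq):
--     complement = {'A' : 'T',
--                   'T' : 'A',
--                   'C' : 'G',
--                   'G' : 'C'}
--     seqR = ''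
--     for char in seq:
--         seqR = seqR + complement[char]
--     seqR = seqR[::-1]
--     return seqR
--
-- def FindMostFrequentKmerAndKmerR(string,k,d):
--     """
--     string = sequence of nucleotides
--     k = lenght of possible mers (pattern) [used to generate every possible mer]
--     d = thresholds of mismatches (Hamming Distance)
--
--     Finding the most frequent kmer (considering also their reverse complement)
--     allowing d mismatches in Hamming Distance
--     """
--
--     chars = ['A' , 'T' , 'C' , 'G']
--     all_possible_kmers = itertools.product(chars,repeat = k)
--     kmers = [''.join(c) for c in all_possible_kmers]
--
--     kmers_freq = {}
--     for mer in kmers: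
--         kmers_freq[mer] = 0
--
--
--     for u in range(len(string) - k + 1):
--         for mer in kmers:
--             if HammingDistance(string[u:u+k], mer) <= 1:
--                 kmers_freq[mer] = kmers_freq[mer] + 1
--                 kmers_freq[ReverseComplement(mer)] = kmers_freq[ReverseComplement(mer)] + 1
--
--     max_ = max(kmers_freq.values())
--     best_mers = []
--     for mer in kmers_freq:
--         if kmers_freq[mer] >= max_:
--             if mer not in best_mers:
--                 best_mers.append(mer)
--     return best_mers
-- ===== SOURCE B (Python) =====
-- import itertools
--
-- def FindMostFrequentKmerAndKmerR(string, k, d):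
--     """Same result as A: tally, per window, its Hamming<=1 ACGT neighbors (and
--     their reverse complements) in a dict -- no scan over all 4^k kmers per window."""
--     comp = {'A': 'T', 'T': 'A', 'C': 'G', 'G': 'C'}
--     chars = ['A', 'T', 'C', 'G']
--     n = len(string)
--     count = {}
--     for u in range(n - k + 1):
--         w = string[u:u+k]
--         cands = [w] + [w[:i] + c + w[i+1:] for i in range(k) for c in chars]
--         for m in set(x for x in cands if all(ch in comp for ch in x)):
--             rm = ''.join(comp[ch] for ch in reversed(m))
--             count[m] = count.get(m, 0) + 1
--             count[rm] = count.get(rm, 0) + 1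
--     max_ = max(count.values(), default=0)
--     return [''.join(p) for p in itertools.product(chars, repeat=k)
--             if count.get(''.join(p), 0) >= max_]
-- ===== Notes on version B (the rewrite author's own statement) =====
-- stated objective: faster
-- what changed: Instead of scanning all 4^k kmers for every window, B enumerates each window's Hamming-distance-<=1 ACGT neighbours and tallies them (and their reverse complements) in a dict, touching only O(k) candidates per window.
import Mathlib
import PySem

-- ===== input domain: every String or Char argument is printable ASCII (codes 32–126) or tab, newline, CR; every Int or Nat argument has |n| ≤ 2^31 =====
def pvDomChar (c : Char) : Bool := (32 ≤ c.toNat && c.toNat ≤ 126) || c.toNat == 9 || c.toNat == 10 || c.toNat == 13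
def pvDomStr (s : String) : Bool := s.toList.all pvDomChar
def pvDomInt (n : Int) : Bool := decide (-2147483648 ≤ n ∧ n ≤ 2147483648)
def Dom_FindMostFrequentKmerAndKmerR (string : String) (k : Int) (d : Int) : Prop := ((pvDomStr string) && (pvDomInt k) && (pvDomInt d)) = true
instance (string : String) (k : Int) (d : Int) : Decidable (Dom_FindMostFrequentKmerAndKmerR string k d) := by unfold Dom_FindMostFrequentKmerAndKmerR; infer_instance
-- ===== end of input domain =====

-- B replaces A's per-window scan over all 4^k kmers by tallying, per window, its
-- Hamming-distance-≤1 ACGT neighbours (and their reverse complements) in a dict.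

-- ===== PORT A =====

def pvHamming (p q : List Char) : Int :=
  (PySem.List.pyRange 0 p.length 1).foldl
    (fun count i => if PySem.List.pyGet? p i ≠ PySem.List.pyGet? q i then count + 1 else count) 0

def pvComplementA : PySem.Dict Char Char :=
  PySem.Dict.ofList [('A','T'),('T','A'),('C','G'),('G','C')]

-- complement[char]'s KeyError is unreachable (A only calls this on 'ATCG' kmers);
-- seqR[::-1] is reverse (PySem.List.slice?_none_none_neg_one)
def pvReverseComplement (seq : List Char) : List Char :=
  (seq.foldl (fun seqR ch => seqR ++ [(pvComplementA.get? ch).getD ch]) []).reverse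

def pvChars : List Char := ['A', 'T', 'C', 'G']

-- itertools.product(chars, repeat=k): leftmost slot varies slowest
def pvProduct : Nat → List (List Char)
  | 0 => [[]]
  | n + 1 => pvChars.flatMap (fun c => (pvProduct n).map (fun t => c :: t))

def FindMostFrequentKmerAndKmerR (string : String) (k : Int) (d : Int) : List String :=
  let kmers : List (List Char) := pvProduct k.toNat   -- k < 0: Python raises ValueError, outside Pre_
  let freq0 : PySem.Dict (List Char) Int :=
    kmers.foldl (fun f mer => f.insert mer 0) PySem.Dict.empty
  let s := string.toList
  let freq : PySem.Dict (List Char) Int :=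
    (PySem.List.pyRange 0 ((PySem.List.len s) - k + 1) 1).foldl (fun f u =>
      kmers.foldl (fun f mer =>
        if pvHamming (PySem.List.slice s (some u) (some (u + k))) mer ≤ 1 then
          let f1 := f.insert mer (f.getD mer 0 + 1)
          f1.insert (pvReverseComplement mer) (f1.getD (pvReverseComplement mer) 0 + 1)
        else f) f) freq0
  -- max() of a nonempty list (the dict always holds all 4^k ≥ 1 kmers)
  let max_ : Int := (PySem.List.max? freq.values (fun v => v)).getD 0
  let best := freq.keys.foldl (fun best mer =>
    if freq.getD mer 0 ≥ max_ then
      if mer ∈ best then best else best ++ [mer]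
    else best) []
  best.map String.mk

-- ===== PORT B =====

def pvComp : PySem.Dict Char Char :=
  PySem.Dict.ofList [('A','T'),('T','A'),('C','G'),('G','C')]

-- comp[ch]'s KeyError is unreachable: every ch of m was checked 'ch in comp'
def pvRC (m : List Char) : List Char :=
  m.reverse.map (fun ch => (pvComp.get? ch).getD ch)

def FindMostFrequentKmerAndKmerR_alt (string : String) (k : Int) (d : Int) : List String :=
  let s := string.toList
  let n := PySem.List.len s
  let count : PySem.Dict (List Char) Int :=
    (PySem.List.pyRange 0 (n - k + 1) 1).foldl (fun count u =>
      let w := PySem.List.slice s (some u) (some (u + k))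
      let cands := w :: (PySem.List.pyRange 0 k 1).flatMap (fun i =>
        pvChars.map (fun c =>
          PySem.List.slice w none (some i) ++ [c] ++ PySem.List.slice w (some (i + 1)) none))
      (PySem.Set.ofList (cands.filter (fun x => x.all (fun ch => pvComp.contains ch)))).foldl
        (fun count m =>
          let rm := pvRC m
          let count1 := count.insert m (count.getD m 0 + 1)
          count1.insert rm (count1.getD rm 0 + 1)) count) PySem.Dict.empty
  let max_ : Int := PySem.List.maxD count.values (fun v => v) 0
  ((pvProduct k.toNat).filter (fun p => count.getD p 0 ≥ max_)).map String.mk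

-- ===== PRECONDITION & SPEC =====

-- Pre_ excludes only k < 0, where A raises ValueError (itertools.product with a negative repeat).
def Pre_FindMostFrequentKmerAndKmerR (string : String) (k : Int) (d : Int) : Prop := 0 ≤ k
instance (string : String) (k : Int) (d : Int) : Decidable (Pre_FindMostFrequentKmerAndKmerR string k d) := by unfold Pre_FindMostFrequentKmerAndKmerR; infer_instance

def pvWitness_FindMostFrequentKmerAndKmerR : String × Int × Int := ("ACGT", 2, 1)

def Spec_FindMostFrequentKmerAndKmerR (string : String) (k : Int) (d : Int) (out : List String) : Prop := out = FindMostFrequentKmerAndKmerR_alt string k d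
instance (string : String) (k : Int) (d : Int) (out : List String) : Decidable (Spec_FindMostFrequentKmerAndKmerR string k d out) := by unfold Spec_FindMostFrequentKmerAndKmerR; infer_instance

-- ===== CLAIM (what is proved, stated in full; the proofs are below) =====
def Claim_equal_FindMostFrequentKmerAndKmerR : Prop := ∀ (string : String) (k : Int) (d : Int), Dom_FindMostFrequentKmerAndKmerR string k d → Pre_FindMostFrequentKmerAndKmerR string k d → Spec_FindMostFrequentKmerAndKmerR string k d (FindMostFrequentKmerAndKmerR string k d)

-- ===== LEMMAS AND PROOFS =====

-- Nat-level Hamming distance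
def pvHam (p q : List Char) : Nat :=
  (List.range p.length).countP (fun i => decide (p[i]? ≠ q[i]?))

-- the window string[u:u+k]
def pvWin (s : List Char) (k u : Int) : List Char := PySem.List.slice s (some u) (some (u + k))

-- keys incremented by A at window u (each matching kmer, then its reverse complement)
def pvTallyA (s : List Char) (k u : Int) : List (List Char) :=
  ((pvProduct k.toNat).filter (fun mer => decide (pvHamming (pvWin s k u) mer ≤ 1))).flatMap
    (fun m => [m, pvReverseComplement m])

-- B's candidate list and neighbour set at one window
def pvCands (w : List Char) (k : Int) : List (List Char) :=
  w :: (PySem.List.pyRange 0 k 1).flatMap (fun i =>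
    pvChars.map (fun c =>
      PySem.List.slice w none (some i) ++ [c] ++ PySem.List.slice w (some (i + 1)) none))

def pvNbrs (w : List Char) (k : Int) : List (List Char) :=
  PySem.Set.ofList ((pvCands w k).filter (fun x => x.all (fun ch => pvComp.contains ch)))

def pvTallyB (s : List Char) (k u : Int) : List (List Char) :=
  (pvNbrs (pvWin s k u) k).flatMap (fun m => [m, pvRC m])

def pvLA (s : List Char) (k : Int) : List (List Char) :=
  (PySem.List.pyRange 0 (PySem.List.len s - k + 1) 1).flatMap (pvTallyA s k)

def pvLB (s : List Char) (k : Int) : List (List Char) :=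
  (PySem.List.pyRange 0 (PySem.List.len s - k + 1) 1).flatMap (pvTallyB s k)

def pvFreq0 (k : Int) : PySem.Dict (List Char) Int :=
  (pvProduct k.toNat).foldl (fun f mer => f.insert mer 0) PySem.Dict.empty

def pvFreqA (s : List Char) (k : Int) : PySem.Dict (List Char) Int :=
  (pvLA s k).foldl (fun dd x => dd.insert x (dd.getD x 0 + 1)) (pvFreq0 k)

def pvCntB (s : List Char) (k : Int) : PySem.Dict (List Char) Int :=
  (pvLB s k).foldl (fun dd x => dd.insert x (dd.getD x 0 + 1)) PySem.Dict.empty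

theorem pvHamming_eq (p q : List Char) : pvHamming p q = (pvHam p q : Int) := by
  unfold pvHamming pvHam
  rw [PySem.List.foldl_ite_add_one (fun i => PySem.List.pyGet? p i ≠ PySem.List.pyGet? q i)]
  rw [PySem.List.pyRange_zero_nat, List.countP_map]
  simp [Function.comp_def]

theorem pvHamming_le_one_iff (p q : List Char) : pvHamming p q ≤ 1 ↔ pvHam p q ≤ 1 := by
  rw [pvHamming_eq]
  constructor <;> intro h <;> omega

theorem pvHam_zero_iff {p q : List Char} (h : q.length = p.length) :
    pvHam p q = 0 ↔ q = p := by
  unfold pvHam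
  rw [List.countP_eq_zero]
  constructor
  · intro hall
    apply List.ext_getElem?
    intro i
    by_cases hi : i < p.length
    · have := hall i (List.mem_range.mpr hi)
      simp at this
      exact this.symm
    · rw [List.getElem?_eq_none (by omega), List.getElem?_eq_none (by omega)]
  · intro he i hi
    subst he
    simp

theorem countP_le_one_of_unique {l : List Nat} {f : Nat → Bool} {i : Nat}
    (hnd : l.Nodup) (h : ∀ j ∈ l, f j = true → j = i) : l.countP f ≤ 1 := by
  rw [List.countP_eq_length_filter]
  rcases hf : l.filter f with _ | ⟨a, t⟩
  · simp
  · rcases t with _ | ⟨b, t2⟩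
    · simp
    · exfalso
      have hnd' := hnd.filter f
      rw [hf] at hnd'
      have ha : a ∈ l.filter f := by rw [hf]; simp
      have hb : b ∈ l.filter f := by rw [hf]; simp
      rw [List.mem_filter] at ha hb
      have h1 : a = i := h a ha.1 ha.2
      have h2 : b = i := h b hb.1 hb.2
      rw [List.nodup_cons] at hnd'
      exact hnd'.1 (by simp [h1, h2])

theorem pvHam_le_one_iff {p q : List Char} (h : q.length = p.length) :
    pvHam p q ≤ 1 ↔ q = p ∨ ∃ i < p.length, ∃ c, q = p.take i ++ c :: p.drop (i + 1) := by
  constructor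
  · intro hle
    by_cases h0 : q = p
    · exact Or.inl h0
    · right
      have hne0 : pvHam p q ≠ 0 := fun hz => h0 ((pvHam_zero_iff h).mp hz)
      have h1 : pvHam p q = 1 := by omega
      unfold pvHam at h1
      rw [List.countP_eq_length_filter] at h1
      obtain ⟨i, hfi⟩ := List.length_eq_one_iff.mp h1
      have hi_mem : i ∈ (List.range p.length).filter (fun j => decide (p[j]? ≠ q[j]?)) := by
        rw [hfi]; simp
      rw [List.mem_filter, List.mem_range] at hi_mem
      obtain ⟨hilt, _⟩ := hi_mem
      have huniq : ∀ j, j < p.length → p[j]? ≠ q[j]? → j = i := by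
        intro j hj hne
        have hjm : j ∈ (List.range p.length).filter (fun j => decide (p[j]? ≠ q[j]?)) := by
          rw [List.mem_filter, List.mem_range]
          exact ⟨hj, by simpa using hne⟩
        rw [hfi] at hjm
        simpa using hjm
      have hiq : i < q.length := by omega
      refine ⟨i, hilt, q[i]'hiq, ?_⟩
      have hqset : q = p.set i (q[i]'hiq) := by
        apply List.ext_getElem?
        intro j
        rw [List.getElem?_set]
        by_cases hji : i = j
        · subst hji
          simp [hilt, List.getElem?_eq_getElem hiq]
        · by_cases hj : j < p.length
          · by_cases hne : p[j]? = q[j]?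
            · simp [hji, hne.symm]
            · exact absurd (huniq j hj hne) (fun e => hji e.symm)
          · simp only [hji, if_false]
            rw [List.getElem?_eq_none (l := q) (by omega), List.getElem?_eq_none (by omega)]
      have hset2 : p.set i (q[i]'hiq) = p.take i ++ (q[i]'hiq) :: p.drop (i + 1) := by
        rw [List.set_eq_take_append_cons_drop, if_pos hilt]
      exact hqset.trans hset2
  · intro hor
    rcases hor with he | ⟨i, hi, c, he⟩
    · have : pvHam p q = 0 := (pvHam_zero_iff h).mpr he
      omega
    · have hset : p.take i ++ c :: p.drop (i + 1) = p.set i c := by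
        rw [List.set_eq_take_append_cons_drop, if_pos hi]
      rw [he, hset]
      unfold pvHam
      apply countP_le_one_of_unique (List.nodup_range) (i := i)
      intro j _ hf
      by_contra hne
      rw [decide_eq_true_iff] at hf
      apply hf
      rw [List.getElem?_set, if_neg (fun e => hne e.symm)]

theorem mem_pvProduct {κ : Nat} {x : List Char} :
    x ∈ pvProduct κ ↔ x.length = κ ∧ ∀ c ∈ x, c ∈ pvChars := by
  induction κ generalizing x with
  | zero =>
    constructor
    · intro hx
      simp [pvProduct] at hx
      subst hx
      simp
    · rintro ⟨hl, -⟩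
      rw [List.length_eq_zero_iff] at hl
      subst hl
      simp [pvProduct]
  | succ n ih =>
    constructor
    · intro hx
      simp only [pvProduct, List.mem_flatMap, List.mem_map] at hx
      obtain ⟨c, hc, t, ht, hx⟩ := hx
      subst hx
      have h2 := ih.mp ht
      refine ⟨by simp [h2.1], ?_⟩
      intro c' hc'
      rcases List.mem_cons.mp hc' with he | hm
      · exact he ▸ hc
      · exact h2.2 c' hm
    · rintro ⟨hl, hall⟩
      cases x with
      | nil => simp at hl
      | cons c t =>
        simp only [pvProduct, List.mem_flatMap, List.mem_map]
        exact ⟨c, hall c (by simp), t,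
          ih.mpr ⟨by simpa using hl, fun c' h' => hall c' (by simp [h'])⟩, rfl⟩

theorem nodup_pvProduct (κ : Nat) : (pvProduct κ).Nodup := by
  induction κ with
  | zero => simp [pvProduct]
  | succ n ih =>
    unfold pvProduct
    rw [List.nodup_flatMap]
    constructor
    · intro c _
      exact ih.map (fun a b hab => by injection hab)
    · have hpc : pvChars.Pairwise (· ≠ ·) := by decide
      apply hpc.imp
      intro a b hab
      simp only [Function.onFun]
      rw [List.disjoint_left]
      rintro x hxa hxb
      obtain ⟨t1, _, rfl⟩ := List.mem_map.mp hxa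
      obtain ⟨t2, _, he⟩ := List.mem_map.mp hxb
      exact hab (by injection he with h1 _; exact h1.symm)

theorem pvProduct_ne_nil (κ : Nat) : pvProduct κ ≠ [] := by
  apply List.ne_nil_of_mem (a := List.replicate κ 'A')
  rw [mem_pvProduct]
  refine ⟨List.length_replicate, ?_⟩
  intro c hc
  rw [List.eq_of_mem_replicate hc]
  decide

theorem pvComp_keys : pvComp.keys = pvChars := by decide

theorem pvComp_contains (ch : Char) : pvComp.contains ch = decide (ch ∈ pvChars) := by
  rw [PySem.Dict.contains_eq_decide_mem_keys, pvComp_keys]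

theorem pvRC_eq (m : List Char) : pvReverseComplement m = pvRC m := by
  unfold pvReverseComplement pvRC
  rw [show pvComplementA = pvComp from rfl, PySem.List.foldl_append_singleton_eq_map,
    List.nil_append, List.map_reverse]

theorem pvRC_char {ch : Char} (h : ch ∈ pvChars) : (pvComp.get? ch).getD ch ∈ pvChars := by
  simp only [pvChars, List.mem_cons, List.not_mem_nil, or_false] at h
  rcases h with rfl | rfl | rfl | rfl <;> decide

theorem pvRC_length (m : List Char) : (pvRC m).length = m.length := by
  simp [pvRC]

theorem pvRC_mem {κ : Nat} {m : List Char} (h : m ∈ pvProduct κ) : pvRC m ∈ pvProduct κ := by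
  rw [mem_pvProduct] at h ⊢
  obtain ⟨hl, hc⟩ := h
  refine ⟨by rw [pvRC_length, hl], ?_⟩
  intro c hcm
  simp only [pvRC, List.mem_map, List.mem_reverse] at hcm
  obtain ⟨a, ha, he⟩ := hcm
  exact he ▸ pvRC_char (hc a ha)

-- ---- dict layer ----

theorem foldl_twoinc (rc : List Char → List Char) (l : List (List Char)) :
    ∀ f : PySem.Dict (List Char) Int,
      l.foldl (fun f m =>
        (f.insert m (f.getD m 0 + 1)).insert (rc m) ((f.insert m (f.getD m 0 + 1)).getD (rc m) 0 + 1)) f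
      = (l.flatMap (fun m => [m, rc m])).foldl (fun dd x => dd.insert x (dd.getD x 0 + 1)) f := by
  induction l with
  | nil => intro f; rfl
  | cons a t ih =>
    intro f
    rw [List.flatMap_cons, List.foldl_append, List.foldl_cons]
    exact ih _

theorem insert0_getD (v : List Char) (l : List (List Char)) :
    ∀ d : PySem.Dict (List Char) Int, d.getD v 0 = 0 →
      (l.foldl (fun f mer => f.insert mer 0) d).getD v 0 = 0 := by
  induction l with
  | nil => intro d hd; exact hd
  | cons a t ih =>
    intro d hd
    rw [List.foldl_cons]
    apply ih
    rw [PySem.Dict.getD_insert]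
    split <;> simp [hd]

theorem getD_A (s : List Char) (k : Int) (v : List Char) :
    (pvFreqA s k).getD v 0 = ((pvLA s k).count v : Int) := by
  unfold pvFreqA pvFreq0
  rw [PySem.Dict.getD_foldl_insert_add_one]
  rw [insert0_getD v _ _ (by rw [PySem.Dict.getD_empty])]
  ring

theorem getD_B (s : List Char) (k : Int) (v : List Char) :
    (pvCntB s k).getD v 0 = ((pvLB s k).count v : Int) := by
  unfold pvCntB
  rw [PySem.Dict.getD_foldl_insert_add_one, PySem.Dict.getD_empty]
  ring

theorem mem_LA {s : List Char} {k : Int} {v : List Char} (hv : v ∈ pvLA s k) :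
    v ∈ pvProduct k.toNat := by
  unfold pvLA pvTallyA at hv
  rw [List.mem_flatMap] at hv
  obtain ⟨u, _, hv⟩ := hv
  rw [List.mem_flatMap] at hv
  obtain ⟨m, hm, hvm⟩ := hv
  have hmk : m ∈ pvProduct k.toNat := (List.mem_filter.mp hm).1
  rcases List.mem_cons.mp hvm with he | hvm
  · exact he ▸ hmk
  · rcases List.mem_cons.mp hvm with he | hvm
    · rw [he, pvRC_eq]
      exact pvRC_mem hmk
    · simp at hvm

theorem keys_A (s : List Char) (k : Int) : (pvFreqA s k).keys = pvProduct k.toNat := by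
  unfold pvFreqA pvFreq0
  rw [PySem.Dict.keys_foldl_insert, PySem.Dict.keys_foldl_insert, PySem.Dict.keys_empty]
  rw [PySem.Set.update_nil_left]
  rw [PySem.Set.ofList_eq_self_of_nodup _ (nodup_pvProduct k.toNat)]
  rw [PySem.Set.update_eq_append_filter]
  have hnil : (PySem.Set.ofList (pvLA s k)).filter
      (fun y => !PySem.Set.contains (pvProduct k.toNat) y) = [] := by
    rw [List.filter_eq_nil_iff]
    intro y hy
    have hmem : y ∈ pvLA s k := (PySem.Set.mem_ofList _ _).mp hy
    simp [PySem.Set.contains_iff, mem_LA hmem]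
  rw [hnil, List.append_nil]

theorem keys_B (s : List Char) (k : Int) :
    (pvCntB s k).keys = PySem.Set.ofList (pvLB s k) := by
  unfold pvCntB
  rw [PySem.Dict.keys_foldl_insert, PySem.Dict.keys_empty, PySem.Set.update_nil_left]

theorem values_eq_keys_map (dd : PySem.Dict (List Char) Int) (h : dd.keys.Nodup) :
    dd.values = dd.keys.map (fun m => dd.getD m 0) := by
  have hit := PySem.Dict.items_eq_map_keys dd h 0
  show dd.items.map Prod.snd = _
  rw [hit, List.map_map]
  rfl

theorem maxD_eq (xs : List Int) (dflt : Int) :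
    PySem.List.maxD xs (fun v => v) dflt = (PySem.List.max? xs (fun v => v)).getD dflt := by
  cases xs <;> rfl

-- ---- window layer ----

theorem win_length {s : List Char} {k u : Int} (hu : 0 ≤ u) (hk : 0 ≤ k)
    (hle : u + k ≤ PySem.List.len s) : (pvWin s k u).length = k.toNat := by
  unfold pvWin
  rw [PySem.List.slice_toNat _ hu (by omega)]
  rw [PySem.List.len_eq] at hle
  simp only [List.length_take, List.length_drop]
  omega

theorem mem_pvCands {w : List Char} {k : Int} (hk : 0 ≤ k) (hw : w.length = k.toNat)
    {x : List Char} :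
    x ∈ pvCands w k ↔
      x = w ∨ ∃ j < k.toNat, ∃ c ∈ pvChars, x = w.take j ++ c :: w.drop (j + 1) := by
  unfold pvCands
  rw [List.mem_cons]
  simp only [List.mem_flatMap, List.mem_map, PySem.List.mem_pyRange_one]
  constructor
  · rintro (rfl | ⟨i, ⟨hi0, hik⟩, c, hc, rfl⟩)
    · exact Or.inl rfl
    · right
      refine ⟨i.toNat, by omega, c, hc, ?_⟩
      rw [PySem.List.slice_to _ hi0, PySem.List.slice_from _ (by omega)]
      have h1 : (i + 1).toNat = i.toNat + 1 := by omega
      rw [h1]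
      simp
  · rintro (rfl | ⟨j, hj, c, hc, rfl⟩)
    · exact Or.inl rfl
    · right
      refine ⟨(j : Int), ⟨by positivity, by omega⟩, c, hc, ?_⟩
      rw [PySem.List.slice_to _ (by positivity), PySem.List.slice_from _ (by positivity)]
      have h1 : ((j : Int) + 1).toNat = j + 1 := by omega
      have h2 : ((j : Int)).toNat = j := by omega
      rw [h1, h2]
      simp

theorem nbrs_perm {w : List Char} {k : Int} (hk : 0 ≤ k) (hw : w.length = k.toNat) :
    (pvNbrs w k).Perm
      ((pvProduct k.toNat).filter (fun mer => decide (pvHamming w mer ≤ 1))) := by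
  unfold pvNbrs
  rw [List.perm_ext_iff_of_nodup (PySem.Set.nodup_ofList _) ((nodup_pvProduct _).filter _)]
  intro x
  rw [PySem.Set.mem_ofList, List.mem_filter, List.mem_filter]
  have hall : (x.all (fun ch => pvComp.contains ch) = true) ↔ ∀ c ∈ x, c ∈ pvChars := by
    simp [List.all_eq_true, pvComp_contains]
  have hham : (decide (pvHamming w x ≤ 1) = true) ↔ pvHam w x ≤ 1 := by
    rw [decide_eq_true_iff, pvHamming_le_one_iff]
  rw [hall, hham, mem_pvCands hk hw, mem_pvProduct]
  constructor
  · rintro ⟨hcand, hchars⟩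
    rcases hcand with rfl | ⟨j, hj, c, _, rfl⟩
    · exact ⟨⟨hw, hchars⟩, by have := (pvHam_zero_iff (p := x) rfl).mpr rfl; omega⟩
    · have hjw : j < w.length := by omega
      have hlen : (w.take j ++ c :: w.drop (j + 1)).length = w.length := by
        simp only [List.length_append, List.length_take, List.length_cons, List.length_drop]
        omega
      refine ⟨⟨by rw [hlen, hw], hchars⟩, ?_⟩
      exact (pvHam_le_one_iff hlen).mpr (Or.inr ⟨j, hjw, c, rfl⟩)
  · rintro ⟨⟨hlen, hchars⟩, hham1⟩
    refine ⟨?_, hchars⟩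
    have hlw : x.length = w.length := by rw [hlen, hw]
    rcases (pvHam_le_one_iff hlw).mp hham1 with rfl | ⟨i, hi, c, hx⟩
    · exact Or.inl rfl
    · right
      refine ⟨i, by omega, c, ?_, hx⟩
      apply hchars
      rw [hx]
      exact List.mem_append_right _ (List.mem_cons_self)

theorem perm_LA_LB (s : List Char) (k : Int) (hk : 0 ≤ k) :
    (pvLA s k).Perm (pvLB s k) := by
  unfold pvLA pvLB
  apply List.Perm.flatMap (List.Perm.refl _)
  intro u hu
  rw [PySem.List.mem_pyRange_one] at hu
  have hwl : (pvWin s k u).length = k.toNat := win_length hu.1 hk (by omega)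
  unfold pvTallyA pvTallyB
  have hfun : (fun m : List Char => [m, pvReverseComplement m]) = (fun m => [m, pvRC m]) := by
    funext m
    rw [pvRC_eq]
  rw [hfun]
  exact List.Perm.flatMap (nbrs_perm hk hwl).symm (fun _ _ => List.Perm.refl _)

-- ---- the two normal forms ----

theorem freqA_eq (s : List Char) (k : Int) :
    (PySem.List.pyRange 0 ((PySem.List.len s) - k + 1) 1).foldl (fun f u =>
      (pvProduct k.toNat).foldl (fun f mer =>
        if pvHamming (PySem.List.slice s (some u) (some (u + k))) mer ≤ 1 then
          (f.insert mer (f.getD mer 0 + 1)).insert (pvReverseComplement mer)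
            ((f.insert mer (f.getD mer 0 + 1)).getD (pvReverseComplement mer) 0 + 1)
        else f) f)
      ((pvProduct k.toNat).foldl (fun f mer => f.insert mer 0) PySem.Dict.empty)
    = pvFreqA s k := by
  unfold pvFreqA pvFreq0 pvLA
  rw [List.foldl_flatMap]
  apply PySem.List.foldl_congr_mem
  intro acc u _
  unfold pvTallyA pvWin
  rw [← foldl_twoinc, ← PySem.List.foldl_ite_eq_foldl_filter
    (p := fun mer => pvHamming (PySem.List.slice s (some u) (some (u + k))) mer ≤ 1)]

theorem cntB_eq (s : List Char) (k : Int) :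
    (PySem.List.pyRange 0 ((PySem.List.len s) - k + 1) 1).foldl (fun count u =>
      (PySem.Set.ofList ((PySem.List.slice s (some u) (some (u + k)) ::
          (PySem.List.pyRange 0 k 1).flatMap (fun i =>
            pvChars.map (fun c =>
              PySem.List.slice (PySem.List.slice s (some u) (some (u + k))) none (some i) ++ [c] ++
                PySem.List.slice (PySem.List.slice s (some u) (some (u + k))) (some (i + 1)) none))).filter
          (fun x => x.all (fun ch => pvComp.contains ch)))).foldl
        (fun count m =>
          (count.insert m (count.getD m 0 + 1)).insert (pvRC m)
            ((count.insert m (count.getD m 0 + 1)).getD (pvRC m) 0 + 1)) count) PySem.Dict.empty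
    = pvCntB s k := by
  unfold pvCntB pvLB
  rw [List.foldl_flatMap]
  apply PySem.List.foldl_congr_mem
  intro acc u _
  unfold pvTallyB pvNbrs pvCands pvWin
  rw [← foldl_twoinc]

-- ---- maxima ----

theorem max_eq (s : List Char) (k : Int) (hk : 0 ≤ k) :
    (PySem.List.max? (pvFreqA s k).values (fun v => v)).getD 0
      = PySem.List.maxD (pvCntB s k).values (fun v => v) 0 := by
  have hperm := perm_LA_LB s k hk
  have hvA : (pvFreqA s k).values
      = (pvProduct k.toNat).map (fun m => ((pvLB s k).count m : Int)) := by
    rw [values_eq_keys_map _ (by rw [keys_A]; exact nodup_pvProduct _), keys_A]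
    exact List.map_congr_left (fun m _ => by rw [getD_A, hperm.count_eq])
  have hvB : (pvCntB s k).values
      = (PySem.Set.ofList (pvLB s k)).map (fun m => ((pvLB s k).count m : Int)) := by
    rw [values_eq_keys_map _ (by rw [keys_B]; exact PySem.Set.nodup_ofList _), keys_B]
    exact List.map_congr_left (fun m _ => getD_B s k m)
  rw [hvA, hvB, maxD_eq]
  rcases hLB : pvLB s k with _ | ⟨x0, xs0⟩
  · have hLA : pvLA s k = [] := (hLB ▸ hperm).eq_nil
    simp only [hLB, List.count_nil, PySem.Set.ofList_nil, List.map_nil, Nat.cast_zero]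
    have hzero : ((pvProduct k.toNat).map (fun _ : List Char => (0 : Int))) ≠ [] := by
      simp [pvProduct_ne_nil]
    obtain ⟨v, hv⟩ : ∃ v, PySem.List.max? ((pvProduct k.toNat).map (fun _ : List Char => (0 : Int)))
        (fun v => v) = some v := by
      cases h : PySem.List.max? ((pvProduct k.toNat).map (fun _ : List Char => (0 : Int)))
          (fun v => v) with
      | none => exact absurd ((PySem.List.max?_eq_none_iff _ _).mp h) hzero
      | some v => exact ⟨v, rfl⟩
    rw [hv]
    have hvm := PySem.List.max?_mem hv
    rw [List.mem_map] at hvm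
    obtain ⟨_, _, he⟩ := hvm
    rw [← he]
    rfl
  · rw [← hLB]
    have hxkm : ∀ y ∈ pvLB s k, y ∈ pvProduct k.toNat :=
      fun y hy => mem_LA (hperm.mem_iff.mpr hy)
    set c : List Char → Int := fun m => ((pvLB s k).count m : Int) with hc
    have hAne : (pvProduct k.toNat).map c ≠ [] := by
      simp [pvProduct_ne_nil]
    have hBne : (PySem.Set.ofList (pvLB s k)).map c ≠ [] := by
      rw [hLB, PySem.Set.ofList_cons]
      simp
    obtain ⟨vA, hvA'⟩ : ∃ v, PySem.List.max? ((pvProduct k.toNat).map c) (fun v => v) = some v := by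
      cases h : PySem.List.max? ((pvProduct k.toNat).map c) (fun v => v) with
      | none => exact absurd ((PySem.List.max?_eq_none_iff _ _).mp h) hAne
      | some v => exact ⟨v, rfl⟩
    obtain ⟨vB, hvB'⟩ : ∃ v, PySem.List.max? ((PySem.Set.ofList (pvLB s k)).map c) (fun v => v)
        = some v := by
      cases h : PySem.List.max? ((PySem.Set.ofList (pvLB s k)).map c) (fun v => v) with
      | none => exact absurd ((PySem.List.max?_eq_none_iff _ _).mp h) hBne
      | some v => exact ⟨v, rfl⟩
    rw [hvA', hvB']
    have hAmax := PySem.List.max?_isMax hvA'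
    have hBmax := PySem.List.max?_isMax hvB'
    obtain ⟨mA, hmA, hvAe⟩ := List.mem_map.mp (PySem.List.max?_mem hvA')
    obtain ⟨mB, hmB, hvBe⟩ := List.mem_map.mp (PySem.List.max?_mem hvB')
    have hle1 : vB ≤ vA := by
      rw [← hvBe]
      exact hAmax _ (List.mem_map_of_mem (hxkm mB ((PySem.Set.mem_ofList _ _).mp hmB)))
    have hle2 : vA ≤ vB := by
      have hx0 : x0 ∈ pvLB s k := by rw [hLB]; exact List.mem_cons_self
      have h1 : (1 : Int) ≤ c x0 := by
        have hn : 1 ≤ (pvLB s k).count x0 := List.count_pos_iff.mpr hx0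
        simp only [hc]
        exact_mod_cast hn
      have hcx0 : c x0 ≤ vA := hAmax _ (List.mem_map_of_mem (hxkm x0 hx0))
      have hposA : 0 < (pvLB s k).count mA := by
        have : (1 : Int) ≤ c mA := by rw [hvAe]; omega
        simp only [hc] at this
        exact_mod_cast this
      have hmALB : mA ∈ pvLB s k := List.count_pos_iff.mp hposA
      rw [← hvAe]
      exact hBmax _ (List.mem_map_of_mem ((PySem.Set.mem_ofList _ _).mpr hmALB))
    simp only [Option.getD_some]
    omega

-- ---- final selection ----

theorem dedup_fold {α : Type} [BEq α] [LawfulBEq α] (p : α → Prop) [DecidablePred p] :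
    ∀ (l : List α) (acc : List α), l.Nodup → (∀ x ∈ l, x ∉ acc) →
      l.foldl (fun best x => if p x then (if x ∈ best then best else best ++ [x]) else best) acc
        = acc ++ l.filter (fun x => decide (p x)) := by
  intro l
  induction l with
  | nil => intro acc _ _; simp
  | cons a t ih =>
    intro acc hnd hdisj
    rw [List.foldl_cons, List.filter_cons]
    by_cases hpa : p a
    · rw [if_pos hpa, if_neg (hdisj a List.mem_cons_self)]
      rw [ih (acc ++ [a]) (List.nodup_cons.mp hnd).2 ?_]
      · simp only [hpa, decide_true, if_true]
        rw [List.append_assoc, List.singleton_append]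
      · intro x hx
        rw [List.mem_append, List.mem_singleton]
        rintro (h1 | rfl)
        · exact hdisj x (List.mem_cons_of_mem _ hx) h1
        · exact (List.nodup_cons.mp hnd).1 hx
    · rw [if_neg hpa, ih acc (List.nodup_cons.mp hnd).2
        (fun x hx => hdisj x (List.mem_cons_of_mem _ hx))]
      simp [hpa]

theorem endgame (s : List Char) (k : Int) (hk : 0 ≤ k) :
    ((pvFreqA s k).keys.foldl (fun best mer =>
        if (pvFreqA s k).getD mer 0 ≥ (PySem.List.max? (pvFreqA s k).values (fun v => v)).getD 0 then
          if mer ∈ best then best else best ++ [mer]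
        else best) []).map String.mk
      = ((pvProduct k.toNat).filter (fun p =>
          decide ((pvCntB s k).getD p 0 ≥ PySem.List.maxD (pvCntB s k).values (fun v => v) 0))).map
          String.mk := by
  rw [keys_A]
  have hdf : (pvProduct k.toNat).foldl (fun best mer =>
      if (pvFreqA s k).getD mer 0 ≥ (PySem.List.max? (pvFreqA s k).values (fun v => v)).getD 0 then
        if mer ∈ best then best else best ++ [mer]
      else best) []
      = [] ++ (pvProduct k.toNat).filter (fun mer =>
          decide ((pvFreqA s k).getD mer 0 ≥ (PySem.List.max? (pvFreqA s k).values (fun v => v)).getD 0)) :=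
    dedup_fold _ _ _ (nodup_pvProduct _) (fun x _ => List.not_mem_nil)
  rw [hdf, List.nil_append]
  congr 1
  apply List.filter_congr
  intro m _
  congr 1
  rw [getD_A, getD_B, (perm_LA_LB s k hk).count_eq, max_eq s k hk]

-- ===== VERDICT (by name: the statement is the Claim_ definition above) =====
theorem FindMostFrequentKmerAndKmerR_spec : Claim_equal_FindMostFrequentKmerAndKmerR := by
  intro string k d _ hpre
  unfold Spec_FindMostFrequentKmerAndKmerR
  simp only [FindMostFrequentKmerAndKmerR, FindMostFrequentKmerAndKmerR_alt]
  rw [freqA_eq, cntB_eq]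
  exact endgame string.toList k hpre
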